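-- pv_equiv track=rewrite | github.com/michaelting/BWT | bwt.py | DC3_sample
-- ===== SOURCE A (Python) =====
-- def DC3_sample(numlst):
--     """
--     Sort the indices and return the sample indices for B0, B1, B2, and B1UB2
--     Input:
--         numlst - the sequence of interest in numerical list representation
--     Output:
--         B0  - the set of indices i for which i = 0mod3
--         B1  - the set of indices i for which i = 1mod3
--         B2  - the set of indices i for which i = 2mod3
--         C   - the set of indices that is the union of {B1} and {B2}
--     """
--     B0, B1, B2 = [], [], []
--     # sort our indices modulo 3 into our samples
--     for i in range(len(numlst)):
--         if i % 3 == 1: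
--             B1.append(i)
--         elif i % 3 == 2:
--             B2.append(i)
--         elif i % 3 == 0:
--             B0.append(i)
--         else:
--             raise Exception("Invalid index found: %d" % i)
--     # join our difference cover sample positions
--     C = B1[:]       # copy list by value, not by reference
--     C.extend(B2)    # join B1 and B2 by value
--     return B0, B1, B2, C
-- ===== SOURCE B (Python) =====
-- def DC3_sample(numlst):
--     n = len(numlst)
--     B0 = list(range(0, n, 3))
--     B1 = list(range(1, n, 3))
--     B2 = list(range(2, n, 3))
--     return B0, B1, B2, B1 + B2
-- ===== Notes on version B (the rewrite author's own statement) =====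
-- stated objective: idiomatic
-- what changed: Replaces the single full scan with a per-index three-way modulo branch (and its dead else/raise) by three direct strided range constructions, one per residue class, plus list concatenation for C.
import Mathlib
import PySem

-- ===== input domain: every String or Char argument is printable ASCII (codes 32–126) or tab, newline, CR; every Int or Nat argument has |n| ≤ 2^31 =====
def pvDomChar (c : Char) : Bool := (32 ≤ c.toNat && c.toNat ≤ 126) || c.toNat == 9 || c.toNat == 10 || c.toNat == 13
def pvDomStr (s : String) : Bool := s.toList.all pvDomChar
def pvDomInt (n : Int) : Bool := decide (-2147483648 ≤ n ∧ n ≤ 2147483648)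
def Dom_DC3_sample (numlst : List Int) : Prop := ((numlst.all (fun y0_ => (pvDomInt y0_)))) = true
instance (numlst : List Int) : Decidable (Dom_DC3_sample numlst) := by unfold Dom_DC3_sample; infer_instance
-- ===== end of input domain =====

-- B replaces A's single scan with a per-element three-way modulo branch by three direct
-- strided range constructions (one per residue class); same O(n) cost, more idiomatic.

-- ===== PORT A =====
-- loop body of A's 'for i in range(len(numlst))'.  Python's final 'else: raise' is
-- unreachable (i % 3 is always 0, 1 or 2), so the port's final else branch is never taken;
-- it returns the state unchanged.
def DC3_loopA (st : List Int × List Int × List Int) (i : Int) :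
    List Int × List Int × List Int :=
  if PySem.Int.mod i 3 = 1 then (st.1, st.2.1 ++ [i], st.2.2)
  else if PySem.Int.mod i 3 = 2 then (st.1, st.2.1, st.2.2 ++ [i])
  else if PySem.Int.mod i 3 = 0 then (st.1 ++ [i], st.2.1, st.2.2)
  else st

def DC3_sample (numlst : List Int) : List Int × List Int × List Int × List Int :=
  let st := (PySem.List.pyRange 0 (numlst.length : Int) 1).foldl DC3_loopA ([], [], [])
  let C := st.2.1 ++ st.2.2     -- C = B1[:]; C.extend(B2)
  (st.1, st.2.1, st.2.2, C)

-- ===== PORT B =====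
def DC3_sample_alt (numlst : List Int) : List Int × List Int × List Int × List Int :=
  let n : Int := (numlst.length : Int)
  let B0 := PySem.List.pyRange 0 n 3
  let B1 := PySem.List.pyRange 1 n 3
  let B2 := PySem.List.pyRange 2 n 3
  (B0, B1, B2, B1 ++ B2)

-- ===== PRECONDITION & SPEC =====
def Spec_DC3_sample (numlst : List Int) (out : List Int × List Int × List Int × List Int) : Prop := out = DC3_sample_alt numlst
instance (numlst : List Int) (out : List Int × List Int × List Int × List Int) : Decidable (Spec_DC3_sample numlst out) := by unfold Spec_DC3_sample; infer_instance

-- ===== CLAIM (what is proved, stated in full; the proofs are below) =====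
def Claim_equal_DC3_sample : Prop := ∀ (numlst : List Int), Dom_DC3_sample numlst → Spec_DC3_sample numlst (DC3_sample numlst)

-- ===== LEMMAS AND PROOFS =====

-- appending the next index to a stride-3 range: the element ↑n joins pyRange a · 3
-- exactly when n ≡ a (mod 3)
lemma stride3_succ (a : Int) (n : Nat) (h0 : 0 ≤ a) (h3 : a < 3) :
    PySem.List.pyRange a ((n : Int) + 1) 3 =
      if (n : Int) % 3 = a then PySem.List.pyRange a (n : Int) 3 ++ [(n : Int)]
      else PySem.List.pyRange a (n : Int) 3 := by
  rw [PySem.List.pyRange_of_pos a ((n : Int) + 1) (by norm_num),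
      PySem.List.pyRange_of_pos a (n : Int) (by norm_num)]
  by_cases hmod : (n : Int) % 3 = a
  · rw [if_pos hmod]
    have halt : a < (n : Int) + 1 := by omega
    rw [if_pos halt]
    by_cases hn : a < (n : Int)
    · rw [if_pos hn]
      have hc : (((n : Int) + 1 - a + 3 - 1) / 3).toNat = (((n : Int) - a + 3 - 1) / 3).toNat + 1 := by
        omega
      have hv : a + 3 * ((((n : Int) - a + 3 - 1) / 3).toNat : Int) = (n : Int) := by
        omega
      rw [hc, List.range_succ, List.map_append, List.map_singleton, hv]
    · have ha : a = (n : Int) := by omega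
      rw [if_neg hn]
      subst ha
      simp
  · rw [if_neg hmod]
    by_cases hn : a < (n : Int)
    · rw [if_pos (by omega : a < (n : Int) + 1), if_pos hn]
      have hc : (((n : Int) + 1 - a + 3 - 1) / 3).toNat = (((n : Int) - a + 3 - 1) / 3).toNat := by
        omega
      rw [hc]
    · by_cases hn1 : a < (n : Int) + 1
      · exfalso; omega
      · rw [if_neg hn1, if_neg hn]

-- A's loop, run over range(n), appends exactly the three stride-3 ranges
lemma loopA_eq (n : Nat) (b0 b1 b2 : List Int) :
    (PySem.List.pyRange 0 (n : Int) 1).foldl DC3_loopA (b0, b1, b2) =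
      (b0 ++ PySem.List.pyRange 0 (n : Int) 3,
       b1 ++ PySem.List.pyRange 1 (n : Int) 3,
       b2 ++ PySem.List.pyRange 2 (n : Int) 3) := by
  induction n generalizing b0 b1 b2 with
  | zero => simp [PySem.List.pyRange]
  | succ m ih =>
    have hcast : ((m + 1 : Nat) : Int) = (m : Int) + 1 := by push_cast; ring
    rw [hcast, PySem.List.pyRange_one_succ_right (by positivity), List.foldl_append, ih,
        stride3_succ 0 m (by norm_num) (by norm_num),
        stride3_succ 1 m (by norm_num) (by norm_num),
        stride3_succ 2 m (by norm_num) (by norm_num)]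
    have hm : PySem.Int.mod (m : Int) 3 = (m : Int) % 3 :=
      PySem.Int.mod_eq_emod_of_pos (by norm_num)
    simp only [List.foldl_cons, List.foldl_nil, DC3_loopA, hm]
    have h3 : (m : Int) % 3 = 0 ∨ (m : Int) % 3 = 1 ∨ (m : Int) % 3 = 2 := by omega
    rcases h3 with h | h | h <;> simp [h, List.append_assoc]

-- ===== VERDICT (by name: the statement is the Claim_ definition above) =====
theorem DC3_sample_spec : Claim_equal_DC3_sample := by
  intro numlst _
  unfold Spec_DC3_sample DC3_sample DC3_sample_alt
  rw [loopA_eq numlst.length [] [] []]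
  simp
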